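-- pv_equiv track=rewrite | github.com/NikitaKums/TalTech | iti0102/EX08B/encoder.py | _correct_message
-- ===== SOURCE A (Python) =====
-- import string
--
-- def _correct_message(word):
--     """
--     Correct message so it is readable.
--
--     :param word: Message to correct
--     :return: Corrected message
--     """
--     alphabet = list(string.ascii_letters)
--     symbols = ['/', '#', '$', '%', '^', '&', '*', '@', '0', '1', '2', '3', '4', '5', '6', '7', '8', '9']
--     word_list = list(word)
--     new_string = []
--     if not check(word_list):  # if no letters in word
--         return word
--     for i in range(len(word_list) - 1):
--         if word_list[i] == " ":
--             new_string.append("")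
--         if word_list[i] not in alphabet and word_list[i] in symbols:
--             if not check(word_list[0:i]):
--                 new_string.append(word_list[i])
--             if not check(word_list[i:]) and word_list[i] in symbols:
--                 new_string.append(word_list[i])
--             else:
--                 continue
--         if word_list[i] in alphabet or word_list[i] not in symbols:
--             letter = word_list[i]
--             new_string.append(letter)
--         if word_list[i] in symbols and word_list[i + 1] == "":
--             new_string.append(word_list[i])
--         else:
--             continue
--     new_string.append(word_list[-1])
--     return "".join(new_string)
--
-- def check(list1)-> bool:
--     """
--     Check if list contains any characters.
--
--     :param list1: List to check for characters
--     :return: bool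
--     """
--     if any(letter.isalpha() for letter in list1):
--         return True
--     return False
-- ===== SOURCE B (Python) =====
-- SYMBOLS = set('/#$%^&*@0123456789')
--
-- def _correct_message(word):
--     """Single pass: indices of letters give O(1) prefix/suffix letter tests."""
--     letters = [i for i, c in enumerate(word) if c.isalpha()]
--     if not letters:
--         return word
--     first, last = letters[0], letters[-1]
--     out = [c for i, c in enumerate(word[:-1])
--            if c not in SYMBOLS or i <= first or i > last]
--     out.append(word[-1])
--     return ''.join(out)
-- ===== Notes on version B (the rewrite author's own statement) =====
-- stated objective: faster
-- what changed: A re-scans the slices word[:i] and word[i:] for letters at every symbol position (O(n^2)); B collects the letter indices in one enumerate pass and keeps a non-symbol character or one lying at/before the first or after the last letter index, an O(n) single filter.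
import Mathlib
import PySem

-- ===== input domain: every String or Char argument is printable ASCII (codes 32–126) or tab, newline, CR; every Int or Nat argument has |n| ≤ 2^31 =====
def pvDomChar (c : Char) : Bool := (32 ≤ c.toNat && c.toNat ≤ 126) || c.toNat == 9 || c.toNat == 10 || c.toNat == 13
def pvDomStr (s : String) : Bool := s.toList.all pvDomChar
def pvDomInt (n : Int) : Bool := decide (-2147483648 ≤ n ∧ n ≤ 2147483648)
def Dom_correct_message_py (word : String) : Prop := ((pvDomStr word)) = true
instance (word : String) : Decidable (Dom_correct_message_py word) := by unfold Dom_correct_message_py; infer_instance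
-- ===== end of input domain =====

-- B replaces A's per-position slice re-scans (check(word[:i]) / check(word[i:])) by one pass
-- collecting the letter positions, making each keep/drop test a comparison against the first and
-- last letter index; objective: faster.

-- ===== PORT A =====
-- alphabet = list(string.ascii_letters): 1-char strings (list(word) elements are 1-char strings)
def pvAlphabetA : List (List Char) :=
  "abcdefghijklmnopqrstuvwxyzABCDEFGHIJKLMNOPQRSTUVWXYZ".toList.map (fun c => [c])

-- symbols = ['/', '#', '$', '%', '^', '&', '*', '@', '0', …, '9']
def pvSymbolsA : List (List Char) :=
  "/#$%^&*@0123456789".toList.map (fun c => [c])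

-- check(list1): any(letter.isalpha() for letter in list1)
def pvCheckA (l : List (List Char)) : Bool := l.any (fun s => PySem.Chars.strIsalpha s)

-- tail of the loop body after the symbol branch (reached by fall-through, skipped by `continue`)
def pvTailA (wl : List (List Char)) (ns : List (List Char)) (i : Int) (c : List Char) :
    List (List Char) :=
  let ns := if c ∈ pvAlphabetA ∨ c ∉ pvSymbolsA then ns ++ [c] else ns
  if c ∈ pvSymbolsA ∧ PySem.List.pyGetD wl (i + 1) [] = ([] : List Char) then ns ++ [c] else ns

-- one iteration of `for i in range(len(word_list) - 1)` over the accumulator new_string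
def pvStepA (wl : List (List Char)) (ns : List (List Char)) (i : Int) : List (List Char) :=
  let c := PySem.List.pyGetD wl i []
  let ns := if c = [' '] then ns ++ [([] : List Char)] else ns
  if c ∉ pvAlphabetA ∧ c ∈ pvSymbolsA then
    let ns := if ¬ pvCheckA (PySem.List.slice wl (some 0) (some i)) then ns ++ [c] else ns
    if ¬ pvCheckA (PySem.List.slice wl (some i) none) ∧ c ∈ pvSymbolsA then
      pvTailA wl (ns ++ [c]) i c
    else ns  -- continue
  else pvTailA wl ns i c

def correct_message_py (word : String) : String :=
  let wl : List (List Char) := word.toList.map (fun c => [c])   -- word_list = list(word)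
  if ¬ pvCheckA wl then word                                    -- if no letters in word
  else
    let ns := (PySem.List.pyRange 0 ((wl.length : Int) - 1) 1).foldl (pvStepA wl) []
    let ns := ns ++ [PySem.List.pyGetD wl (-1) []]              -- new_string.append(word_list[-1])
    String.ofList (PySem.Chars.join [] ns)                      -- "".join(new_string)

-- ===== PORT B =====
-- SYMBOLS = set('/#$%^&*@0123456789')
def pvSymbolsB : PySem.Set Char := PySem.Set.ofList "/#$%^&*@0123456789".toList

-- letters = [i for i, c in enumerate(word) if c.isalpha()]
def pvLetters (cs : List Char) : List Int :=
  (PySem.List.enumerate cs).filterMap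
    (fun ic => if PySem.Chars.isalpha ic.2 then some ic.1 else none)

def correct_message_py_alt (word : String) : String :=
  let cs := word.toList
  match pvLetters cs with
  | [] => word                                                  -- if not letters: return word
  | first :: rest =>                                            -- first = letters[0]
    let last := PySem.List.pyGetD (first :: rest) (-1) 0        -- last = letters[-1]
    -- out = [c for i, c in enumerate(word[:-1]) if c not in SYMBOLS or i <= first or i > last]
    let out := ((PySem.List.enumerate (PySem.List.slice cs none (some (-1)))).filter
      (fun ic => !(PySem.Set.contains pvSymbolsB ic.2) || decide (ic.1 ≤ first)
                  || decide (last < ic.1))).map (fun ic => ic.2)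
    -- out.append(word[-1]); return ''.join(out)
    String.ofList (out ++ [PySem.List.pyGetD cs (-1) ' '])

-- ===== PRECONDITION & SPEC =====
def Spec_correct_message_py (word : String) (out : String) : Prop := out = correct_message_py_alt word
instance (word : String) (out : String) : Decidable (Spec_correct_message_py word out) := by unfold Spec_correct_message_py; infer_instance

-- ===== CLAIM (what is proved, stated in full; the proofs are below) =====
def Claim_equal_correct_message_py : Prop := ∀ (word : String), Dom_correct_message_py word → Spec_correct_message_py word (correct_message_py word)

-- ===== LEMMAS AND PROOFS =====

-- the symbol characters, as characters
def pvSymChars : List Char := "/#$%^&*@0123456789".toList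

theorem pv_mem_symA (c : Char) : ([c] ∈ pvSymbolsA) ↔ c ∈ pvSymChars := by
  simp [pvSymbolsA, pvSymChars]

-- the ascii_letters characters, as characters
def pvAlphaChars : List Char := "abcdefghijklmnopqrstuvwxyzABCDEFGHIJKLMNOPQRSTUVWXYZ".toList

theorem pv_sym_disjoint_bool : (pvSymChars.all (fun c => !(pvAlphaChars.contains c))) = true := by
  rfl

theorem pv_sym_disjoint :
    ∀ c ∈ pvSymChars, c ∉ "abcdefghijklmnopqrstuvwxyzABCDEFGHIJKLMNOPQRSTUVWXYZ".toList := by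
  intro c hc
  have h2 := (List.all_eq_true.mp pv_sym_disjoint_bool) c hc
  simpa [pvAlphaChars] using h2

theorem pv_sym_not_alpha (c : Char) (h : c ∈ pvSymChars) : [c] ∉ pvAlphabetA := by
  simp only [pvAlphabetA, List.mem_map]
  rintro ⟨d, hd, he⟩
  have hdc : d = c := by simpa using he
  exact pv_sym_disjoint c h (hdc ▸ hd)

theorem pv_space_not_sym : (' ' : Char) ∉ pvSymChars := by decide

theorem pv_strIsalpha_singleton (c : Char) :
    PySem.Chars.strIsalpha [c] = PySem.Chars.isalpha c := by
  simp [PySem.Chars.strIsalpha]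

theorem pv_check_map (l : List Char) :
    pvCheckA (l.map (fun c => [c])) = l.any PySem.Chars.isalpha := by
  simp [pvCheckA, List.any_map, Function.comp_def, pv_strIsalpha_singleton]

theorem pv_mem_letters (cs : List Char) (j : Int) :
    j ∈ pvLetters cs ↔
      ∃ (k : Nat) (h : k < cs.length), j = (k : Int) ∧ PySem.Chars.isalpha cs[k] = true := by
  simp only [pvLetters, List.mem_filterMap, PySem.List.mem_enumerate_iff]
  constructor
  · rintro ⟨p, ⟨k, hk, rfl⟩, hf⟩
    simp only at hf
    by_cases ha : PySem.Chars.isalpha cs[k] = true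
    · simp only [ha, if_true, Option.some.injEq] at hf
      exact ⟨k, hk, by omega, ha⟩
    · simp [ha] at hf
  · rintro ⟨k, hk, rfl, ha⟩
    exact ⟨((k : Int), cs[k]), ⟨k, hk, by simp⟩, by simp [ha]⟩

theorem pv_letters_pairwise (cs : List Char) : (pvLetters cs).Pairwise (· < ·) := by
  unfold pvLetters
  rw [List.pairwise_filterMap]
  refine (PySem.List.pairwise_lt_enumerate cs 0).imp ?_
  intro p q h b hb b' hb'
  split at hb
  · split at hb'
    · injection hb with h1
      injection hb' with h2
      rw [← h1, ← h2]; exact h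
    · cases hb'
  · cases hb

theorem pv_sorted_le_getLastD (l : List Int) (h : l.Pairwise (· < ·)) :
    ∀ x ∈ l, x ≤ l.getLastD 0 := by
  induction l with
  | nil => intro x hx; simp at hx
  | cons a t ih =>
    intro x hx
    cases t with
    | nil => simp at hx; simp [hx]
    | cons b u =>
      rcases List.mem_cons.mp hx with rfl | hxt
      · have hab : x < b := (List.pairwise_cons.mp h).1 b (by simp)
        have hb := ih (List.pairwise_cons.mp h).2 b (by simp)
        simp only [List.getLastD_cons] at *
        omega
      · have := ih (List.pairwise_cons.mp h).2 x hxt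
        simp only [List.getLastD_cons] at *
        omega

theorem pv_first_le_last (cs : List Char) (first : Int) (rest : List Int)
    (hl : pvLetters cs = first :: rest) : first ≤ (first :: rest).getLastD 0 := by
  have hp : (first :: rest).Pairwise (· < · : Int → Int → Prop) := hl ▸ pv_letters_pairwise cs
  exact pv_sorted_le_getLastD _ hp first (List.mem_cons_self ..)

theorem pv_take_any_iff (cs : List Char) (first : Int) (rest : List Int)
    (hl : pvLetters cs = first :: rest) (k : Nat) :
    (cs.take k).any PySem.Chars.isalpha = true ↔ first < (k : Int) := by
  constructor
  · intro h
    obtain ⟨x, hx, hax⟩ := List.any_eq_true.mp h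
    obtain ⟨j, hj, he⟩ := List.mem_take_iff_getElem.mp hx
    have hm : ((j : Nat) : Int) ∈ pvLetters cs :=
      (pv_mem_letters cs j).mpr ⟨j, by omega, rfl, by rw [he]; exact hax⟩
    rw [hl] at hm
    have h1 : first ≤ (j : Int) := by
      rcases List.mem_cons.mp hm with he2 | hmr
      · omega
      · exact le_of_lt ((List.pairwise_cons.mp (hl ▸ pv_letters_pairwise cs)).1 _ hmr)
    omega
  · intro h
    have hmfirst : first ∈ pvLetters cs := by rw [hl]; exact List.mem_cons_self ..
    obtain ⟨kf, hkf, he, ha⟩ := (pv_mem_letters cs first).mp hmfirst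
    have hkfk : kf < k := by omega
    refine List.any_eq_true.mpr ⟨cs[kf], ?_, ha⟩
    exact List.mem_take_iff_getElem.mpr ⟨kf, by omega, rfl⟩

theorem pv_drop_any_iff (cs : List Char) (first : Int) (rest : List Int)
    (hl : pvLetters cs = first :: rest) (k : Nat) :
    (cs.drop k).any PySem.Chars.isalpha = true ↔ (k : Int) ≤ (first :: rest).getLastD 0 := by
  constructor
  · intro h
    obtain ⟨x, hx, hax⟩ := List.any_eq_true.mp h
    obtain ⟨j, hj, he⟩ := List.mem_drop_iff_getElem.mp hx
    have hm : ((k + j : Nat) : Int) ∈ pvLetters cs :=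
      (pv_mem_letters cs _).mpr ⟨k + j, by omega, rfl, by rw [he]; exact hax⟩
    have := pv_sorted_le_getLastD _ (pv_letters_pairwise cs) _ hm
    rw [hl] at this
    push_cast at this ⊢
    omega
  · intro h
    have hlast_mem : (first :: rest).getLastD 0 ∈ pvLetters cs := by
      rw [hl, List.getLastD_cons]; exact List.getLastD_mem_cons ..
    obtain ⟨kl, hkl, he, ha⟩ := (pv_mem_letters cs _).mp hlast_mem
    have hk : k ≤ kl := by omega
    refine List.any_eq_true.mpr ⟨cs[kl], ?_, ha⟩
    refine List.mem_drop_iff_getElem.mpr ⟨kl - k, by omega, ?_⟩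
    simp [show k + (kl - k) = kl from by omega]

theorem pv_step_append (wl : List (List Char)) (ns : List (List Char)) (i : Int) :
    pvStepA wl ns i = ns ++ pvStepA wl [] i := by
  simp only [pvStepA, pvTailA]
  split_ifs <;> simp

theorem pv_foldl_step (wl : List (List Char)) (l : List Nat) (acc : List (List Char)) :
    List.foldl (fun ns k => pvStepA wl ns ((k : Nat) : Int)) acc l
      = acc ++ l.flatMap (fun k => pvStepA wl [] ((k : Nat) : Int)) := by
  induction l generalizing acc with
  | nil => simp
  | cons a t ih =>
    rw [List.foldl_cons, ih, pv_step_append]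
    simp [List.flatMap_cons]

theorem pv_join_nil_flatten (l : List (List Char)) :
    PySem.Chars.join [] l = l.flatten := by
  induction l with
  | nil => simp [PySem.Chars.join_nil]
  | cons a t ih =>
    cases t with
    | nil => simp [PySem.Chars.join_singleton]
    | cons b u =>
      rw [PySem.Chars.join_cons_cons]
      simp only [List.flatten_cons]
      rw [ih]
      simp

theorem pv_flatten_flatMap {α : Type} (g : α → List (List Char)) (l : List α) :
    (l.flatMap g).flatten = l.flatMap (fun x => (g x).flatten) := by
  induction l with
  | nil => simp
  | cons a t ih => simp [List.flatMap_cons, List.flatten_append, ih]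

theorem pv_filter_map_eq_flatMap {α β : Type} (l : List α) (p : α → Bool) (g : α → β) :
    (l.filter p).map g = l.flatMap (fun x => if p x then [g x] else []) := by
  induction l with
  | nil => simp
  | cons a t ih => by_cases h : p a <;> simp [h, ih]

theorem pv_getD_map_singleton (cs : List Char) (k : Nat) (hk : k < cs.length) :
    (cs.map (fun c => [c])).getD k [] = [cs[k]] := by
  simp [List.getD_eq_getElem?_getD, hk]

-- the per-index contribution of both loops, over total indexing
def pvKeep (cs : List Char) (first lastL : Int) (k : Nat) : List Char :=
  if (!(PySem.Set.contains pvSymbolsB (cs.getD k ' ')) || decide ((k : Int) ≤ first)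
      || decide (lastL < (k : Int))) = true
  then [cs.getD k ' '] else []

theorem pv_stepA_flatten (cs : List Char) (first : Int) (rest : List Int)
    (hl : pvLetters cs = first :: rest) (k : Nat) (hk : k + 1 < cs.length) :
    (pvStepA (cs.map (fun c => [c])) [] ((k : Nat) : Int)).flatten =
      pvKeep cs first ((first :: rest).getLastD 0) k := by
  have hkn : k < cs.length := by omega
  have hgd : cs.getD k ' ' = cs[k] := List.getD_eq_getElem cs ' ' hkn
  have hc : PySem.List.pyGetD (cs.map (fun c => [c])) ((k : Nat) : Int) [] = [cs[k]] := by
    rw [PySem.List.pyGetD_natCast]; exact pv_getD_map_singleton cs k hkn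
  have hc1 : PySem.List.pyGetD (cs.map (fun c => [c])) (((k : Nat) : Int) + 1) [] = [cs[k + 1]] := by
    have hcast : (((k : Nat) : Int) + 1) = (((k + 1 : Nat) : Nat) : Int) := by push_cast; ring
    rw [hcast, PySem.List.pyGetD_natCast]; exact pv_getD_map_singleton cs (k + 1) hk
  have hsl0 : PySem.List.slice (cs.map (fun c => [c])) (some 0) (some ((k : Nat) : Int))
      = (cs.take k).map (fun c => [c]) := by
    rw [PySem.List.slice_zero_start, PySem.List.slice_to_natCast, List.map_take]
  have hslk : PySem.List.slice (cs.map (fun c => [c])) (some ((k : Nat) : Int)) none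
      = (cs.drop k).map (fun c => [c]) := by
    rw [PySem.List.slice_from_natCast, List.map_drop]
  have hmemB_iff : ∀ c : Char, c ∈ pvSymbolsB ↔ c ∈ pvSymChars := fun c => by
    simp [pvSymbolsB, pvSymChars, PySem.Set.mem_ofList]
  have htk := pv_take_any_iff cs first rest hl k
  have hdr := pv_drop_any_iff cs first rest hl k
  have hfl := pv_first_le_last cs first rest hl
  set L := (first :: rest).getLastD 0 with hLdef
  simp only [pvStepA, pvTailA, pvKeep, hc, hc1, hsl0, hslk, pv_check_map, hgd]
  by_cases hS : cs[k] ∈ pvSymChars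
  · have hnsp : ¬ ([cs[k]] = [' ']) := by
      intro h
      have hce : cs[k] = ' ' := by simpa using h
      rw [hce] at hS; exact pv_space_not_sym hS
    have hnal : [cs[k]] ∉ pvAlphabetA := pv_sym_not_alpha _ hS
    have hsm : [cs[k]] ∈ pvSymbolsA := (pv_mem_symA _).mpr hS
    have hmemB : cs[k] ∈ pvSymbolsB := (hmemB_iff _).mpr hS
    by_cases h1 : (cs.take k).any PySem.Chars.isalpha = true
    · by_cases h2 : (cs.drop k).any PySem.Chars.isalpha = true
      · have ha : first < (k : Int) := htk.mp h1
        have hb : (k : Int) ≤ L := hdr.mp h2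
        simp [hnsp, hnal, hsm, h1, h2, hmemB,
          show ¬ ((k : Int) ≤ first) from by omega,
          show ¬ (L < (k : Int)) from by omega]
      · have hnb : ¬ ((k : Int) ≤ L) := fun hx => h2 (hdr.mpr hx)
        simp [hnsp, hnal, hsm, h1, h2, show (L < (k : Int)) from by omega]
    · have hnlt : ¬ (first < (k : Int)) := fun hx => h1 (htk.mpr hx)
      have h2 : (cs.drop k).any PySem.Chars.isalpha = true := hdr.mpr (by omega)
      simp [hnsp, hnal, hsm, h1, h2, show ((k : Int) ≤ first) from by omega]
  · have hnsm : [cs[k]] ∉ pvSymbolsA := fun h => hS ((pv_mem_symA _).mp h)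
    have hnmemB : cs[k] ∉ pvSymbolsB := fun h => hS ((hmemB_iff _).mp h)
    by_cases hsp : cs[k] = ' '
    · rw [hsp] at hnsm hnmemB
      simp [hsp, hnsm, hnmemB]
    · simp [hsp, hnsm, hnmemB]

theorem pv_last_getD (first : Int) (rest : List Int) :
    PySem.List.pyGetD (first :: rest) (-1) 0 = (first :: rest).getLastD 0 := by
  rw [PySem.List.pyGetD_neg_one _ _ (List.cons_ne_nil _ _), List.getLastD_cons]
  apply List.getLast_eq_getLastD

theorem correct_message_py_equiv (word : String) :
    correct_message_py word = correct_message_py_alt word := by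
  cases hl : pvLetters word.toList with
  | nil =>
    have hany : word.toList.any PySem.Chars.isalpha = false := by
      rw [Bool.eq_false_iff]
      intro h
      obtain ⟨x, hx, hax⟩ := List.any_eq_true.mp h
      obtain ⟨k, hk, he⟩ := List.mem_iff_getElem.mp hx
      have : ((k : Nat) : Int) ∈ pvLetters word.toList :=
        (pv_mem_letters _ _).mpr ⟨k, hk, rfl, by rw [he]; exact hax⟩
      rw [hl] at this
      simp at this
    simp only [correct_message_py, correct_message_py_alt, hl, pv_check_map, hany]
    simp
  | cons first rest =>
    set cs := word.toList with hcs
    have hmfirst : first ∈ pvLetters cs := by rw [hl]; exact List.mem_cons_self ..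
    obtain ⟨kf, hkf, hfe, hfa⟩ := (pv_mem_letters cs first).mp hmfirst
    have hany : cs.any PySem.Chars.isalpha = true :=
      List.any_eq_true.mpr ⟨cs[kf], List.getElem_mem hkf, hfa⟩
    have hne : cs ≠ [] := by intro h; rw [h] at hkf; simp at hkf
    have hnpos : 1 ≤ cs.length := List.length_pos_iff.mpr hne
    -- A side
    have hcheck : pvCheckA (cs.map (fun c => [c])) = true := by rw [pv_check_map]; exact hany
    have hwlen : (((cs.map (fun c => [c])).length : Int) - 1) = ((cs.length - 1 : Nat) : Int) := by
      rw [List.length_map]; omega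
    have hwne : cs.map (fun c => [c]) ≠ [] := by simp [hne]
    have hlastA : PySem.List.pyGetD (cs.map (fun c => [c])) (-1) [] = [cs.getLast hne] := by
      rw [PySem.List.pyGetD_neg_one _ _ hwne, List.getLast_eq_getElem, List.getLast_eq_getElem]
      simp [List.length_map]
    have hA : correct_message_py word = String.ofList
        (((List.range (cs.length - 1)).flatMap
            (fun k => pvKeep cs first ((first :: rest).getLastD 0) k)) ++ [cs.getLast hne]) := by
      simp only [correct_message_py, ← hcs, hcheck, not_true, if_false,
        hwlen, hlastA]
      rw [PySem.List.pyRange_zero_natCast, List.foldl_map, pv_foldl_step,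
        List.nil_append, pv_join_nil_flatten, List.flatten_append, pv_flatten_flatMap]
      simp only [List.flatten_cons, List.flatten_nil, List.append_nil]
      refine congrArg _ ?_
      refine congrArg (fun l => l ++ [cs.getLast hne]) ?_
      exact List.flatMap_congr fun k hk =>
        pv_stepA_flatten cs first rest hl k (by have := List.mem_range.mp hk; omega)
    -- B side
    have hlen' : (cs.dropLast).length = cs.length - 1 := List.length_dropLast
    have hlen2 : PySem.List.len (cs.dropLast) = ((cs.length - 1 : Nat) : Int) := by
      simp [PySem.List.len, hlen']
    have hB : correct_message_py_alt word = String.ofList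
        (((List.range (cs.length - 1)).flatMap
            (fun k => pvKeep cs first ((first :: rest).getLastD 0) k)) ++ [cs.getLast hne]) := by
      simp only [correct_message_py_alt, ← hcs, hl, pv_last_getD, PySem.List.slice_to_neg_one]
      rw [PySem.List.enumerate_eq_map_pyRange (cs.dropLast) ' ', hlen2,
        PySem.List.pyRange_zero_natCast]
      simp only [List.map_map, List.filter_map]
      rw [pv_filter_map_eq_flatMap, PySem.List.pyGetD_neg_one _ _ hne]
      refine congrArg _ ?_
      refine congrArg (fun l => l ++ [cs.getLast hne]) ?_
      refine List.flatMap_congr fun k hk => ?_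
      have hklt : k < cs.length - 1 := List.mem_range.mp hk
      have hgd : PySem.List.pyGetD (cs.dropLast) ((k : Nat) : Int) ' ' = cs.getD k ' ' := by
        rw [PySem.List.pyGetD_natCast]
        rw [List.getD_eq_getElem _ ' ' (by omega : k < (cs.dropLast).length)]
        rw [List.getD_eq_getElem _ ' ' (by omega : k < cs.length)]
        exact List.getElem_dropLast _
      simp only [Function.comp_def, pvKeep, hgd]
    rw [hA, hB]

-- ===== VERDICT (by name: the statement is the Claim_ definition above) =====
theorem correct_message_py_spec : Claim_equal_correct_message_py := by
  intro word _
  unfold Spec_correct_message_py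
  exact correct_message_py_equiv word
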